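-- pv_equiv track=rewrite | github.com/youngyangyang/praxys | scripts/translate_missing.py | _obsolete_block_ranges
-- ===== SOURCE A (Python) =====
-- def _obsolete_block_ranges(lines: list[str]) -> list[tuple[int, int]]:
--     """Return (start, end_exclusive) ranges for each obsolete entry block.
--
--     A block is one or more contiguous `#~` lines plus the `#:` / `#.` / `#,`
--     comment lines Lingui emits directly above them (which reference the
--     now-obsolete msgid, not the following active entry). Blank lines are
--     boundaries and never part of a block.
--     """
--     ranges: list[tuple[int, int]] = []
--     n = len(lines)
--     i = 0
--     while i < n:
--         if lines[i].lstrip().startswith("#~"):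
--             # Walk back to collect refs/comments belonging to this obsolete
--             # entry, stopping at a blank line or any non-`#` content.
--             start = i
--             j = i - 1
--             while j >= 0:
--                 s = lines[j].lstrip()
--                 if s == "" or not s.startswith("#"):
--                     break
--                 start = j
--                 j -= 1
--             # Walk forward across contiguous `#~` lines.
--             end = i
--             while end < n and lines[end].lstrip().startswith("#~"):
--                 end += 1
--             ranges.append((start, end))
--             i = end
--         else:
--             i += 1
--     return ranges
-- ===== SOURCE B (Python) =====
-- def _obsolete_block_ranges(lines: list[str]) -> list[tuple[int, int]]:
--     """Single forward pass: track where the current contiguous run of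
--     `#` comment lines began, so no backward walk is needed."""
--     ranges: list[tuple[int, int]] = []
--     n = len(lines)
--     comment_start = None
--     i = 0
--     while i < n:
--         s = lines[i].lstrip()
--         if s.startswith("#"):
--             if comment_start is None:
--                 comment_start = i
--             if s.startswith("#~"):
--                 end = i + 1
--                 while end < n and lines[end].lstrip().startswith("#~"):
--                     end += 1
--                 ranges.append((comment_start, end))
--                 i = end
--             else:
--                 i += 1
--         else:
--             comment_start = None
--             i += 1
--     return ranges
-- ===== Notes on version B (the rewrite author's own statement) =====
-- stated objective: alternative
-- what changed: Replaced the backward walk that re-collects the preceding comment run at every `#~` block by a single forward pass that maintains the start index of the current contiguous `#` comment run.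
import Mathlib
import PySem

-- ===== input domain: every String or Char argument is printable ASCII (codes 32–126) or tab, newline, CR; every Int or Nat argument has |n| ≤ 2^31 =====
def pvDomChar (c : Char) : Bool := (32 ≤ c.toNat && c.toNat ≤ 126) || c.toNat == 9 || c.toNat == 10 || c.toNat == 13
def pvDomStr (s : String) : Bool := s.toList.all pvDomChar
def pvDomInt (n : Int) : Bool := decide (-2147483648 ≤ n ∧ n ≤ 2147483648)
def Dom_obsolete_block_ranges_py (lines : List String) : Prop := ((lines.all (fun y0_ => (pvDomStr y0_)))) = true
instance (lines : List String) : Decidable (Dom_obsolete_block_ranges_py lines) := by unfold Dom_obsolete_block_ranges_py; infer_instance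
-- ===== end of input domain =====

-- B replaces A's per-block backward walk by a single forward pass tracking the start
-- of the current contiguous `#` comment run (objective: alternative decomposition).

-- ===== PORT A =====
-- inner backward walk: `start` is Python's start, argument j here encodes Python's j + 1
-- (so 0 means Python's j = -1 and the `while j >= 0` loop ends)
def pvABack (lines : List String) (start : Nat) : Nat → Nat
  | 0 => start
  | j + 1 =>
    let s := PySem.Str.lstrip (lines.getD j "")
    if s = "" ∨ ¬ (PySem.Str.startswith s "#" = true) then start
    else pvABack lines j j

-- inner forward walk across contiguous `#~` lines
def pvAFwd (lines : List String) (n e : Nat) : Nat :=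
  if e < n ∧ PySem.Str.startswith (PySem.Str.lstrip (lines.getD e "")) "#~" = true then
    pvAFwd lines n (e + 1)
  else e
termination_by n - e

theorem pvAFwd_ge (lines : List String) (n : Nat) : ∀ d e, n - e ≤ d → e ≤ pvAFwd lines n e := by
  intro d
  induction d with
  | zero =>
    intro e h; rw [pvAFwd]
    split
    · omega
    · exact Nat.le_refl e
  | succ d ih =>
    intro e h; rw [pvAFwd]
    split
    · exact Nat.le_trans (Nat.le_succ e) (ih (e + 1) (by omega))
    · exact Nat.le_refl e

theorem pvAFwd_lt (lines : List String) (n i : Nat) (h1 : i < n)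
    (h2 : PySem.Str.startswith (PySem.Str.lstrip (lines.getD i "")) "#~" = true) :
    i < pvAFwd lines n i := by
  rw [pvAFwd, if_pos ⟨h1, h2⟩]
  have := pvAFwd_ge lines n (n - (i + 1)) (i + 1) (Nat.le_refl _)
  omega

-- the main `while i < n` loop
def pvALoop (lines : List String) (n i : Nat) (acc : List (Int × Int)) : List (Int × Int) :=
  if h : i < n then
    if h2 : PySem.Str.startswith (PySem.Str.lstrip (lines.getD i "")) "#~" = true then
      let start := pvABack lines i i
      let e := pvAFwd lines n i
      pvALoop lines n e (acc ++ [((start : Int), (e : Int))])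
    else pvALoop lines n (i + 1) acc
  else acc
termination_by n - i
decreasing_by
  · have := pvAFwd_lt lines n i h h2; omega
  · omega

def obsolete_block_ranges_py (lines : List String) : List (Int × Int) :=
  pvALoop lines lines.length 0 []

-- ===== PORT B =====
-- forward scan across contiguous `#~` lines (starts at i + 1 in B)
def pvBFwd (lines : List String) (n e : Nat) : Nat :=
  if e < n ∧ PySem.Str.startswith (PySem.Str.lstrip (lines.getD e "")) "#~" = true then
    pvBFwd lines n (e + 1)
  else e
termination_by n - e

theorem pvBFwd_ge (lines : List String) (n : Nat) : ∀ d e, n - e ≤ d → e ≤ pvBFwd lines n e := by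
  intro d
  induction d with
  | zero =>
    intro e h; rw [pvBFwd]
    split
    · omega
    · exact Nat.le_refl e
  | succ d ih =>
    intro e h; rw [pvBFwd]
    split
    · exact Nat.le_trans (Nat.le_succ e) (ih (e + 1) (by omega))
    · exact Nat.le_refl e

-- main loop: cs is Python's comment_start (None ↔ no current `#` run)
def pvBLoop (lines : List String) (n i : Nat) (cs : Option Nat) (acc : List (Int × Int)) :
    List (Int × Int) :=
  if h : i < n then
    let s := PySem.Str.lstrip (lines.getD i "")
    if PySem.Str.startswith s "#" = true then
      let cs' := cs.getD i
      if PySem.Str.startswith s "#~" = true then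
        let e := pvBFwd lines n (i + 1)
        pvBLoop lines n e (some cs') (acc ++ [((cs' : Int), (e : Int))])
      else pvBLoop lines n (i + 1) (some cs') acc
    else pvBLoop lines n (i + 1) none acc
  else acc
termination_by n - i
decreasing_by
  · have := pvBFwd_ge lines n (n - (i + 1)) (i + 1) (Nat.le_refl _); omega
  · omega
  · omega

def obsolete_block_ranges_py_alt (lines : List String) : List (Int × Int) :=
  pvBLoop lines lines.length 0 none []

-- ===== PRECONDITION & SPEC =====
def Spec_obsolete_block_ranges_py (lines : List String) (out : List (Int × Int)) : Prop := out = obsolete_block_ranges_py_alt lines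
instance (lines : List String) (out : List (Int × Int)) : Decidable (Spec_obsolete_block_ranges_py lines out) := by unfold Spec_obsolete_block_ranges_py; infer_instance

-- ===== CLAIM (what is proved, stated in full; the proofs are below) =====
def Claim_equal_obsolete_block_ranges_py : Prop := ∀ (lines : List String), Dom_obsolete_block_ranges_py lines → Spec_obsolete_block_ranges_py lines (obsolete_block_ranges_py lines)

-- ===== LEMMAS AND PROOFS =====

-- `line k` is a `#` comment line / a `#~` obsolete line
def pvIsh (lines : List String) (k : Nat) : Bool :=
  PySem.Str.startswith (PySem.Str.lstrip (lines.getD k "")) "#"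
def pvIsht (lines : List String) (k : Nat) : Bool :=
  PySem.Str.startswith (PySem.Str.lstrip (lines.getD k "")) "#~"

theorem pvIsh_of_isht (lines : List String) (k : Nat) (h : pvIsht lines k = true) :
    pvIsh lines k = true := by
  unfold pvIsht at h
  unfold pvIsh
  simp only [PySem.Str.startswith_eq, PySem.Chars.startswith_iff] at h ⊢
  exact List.IsPrefix.trans (by decide) h

theorem pvStartswith_ne_empty {s : String} (h : PySem.Str.startswith s "#" = true) : ¬ s = "" := by
  intro he; subst he
  simp only [PySem.Str.startswith_eq, PySem.Chars.startswith_iff] at h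
  exact absurd h (by decide)

-- the invariant B's comment_start maintains at position i
def pvInv (lines : List String) (i : Nat) : Option Nat → Prop
  | none => i = 0 ∨ pvIsh lines (i - 1) = false
  | some s => s ≤ i ∧ (∀ k, s ≤ k → k < i → pvIsh lines k = true) ∧
      (s = 0 ∨ pvIsh lines (s - 1) = false)

-- A's backward walk returns the start of the maximal `#` run ending just below i
theorem pvABack_run (lines : List String) (s : Nat)
    (hb : s = 0 ∨ pvIsh lines (s - 1) = false) :
    ∀ i, s ≤ i → (∀ k, s ≤ k → k < i → pvIsh lines k = true) → pvABack lines i i = s := by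
  intro i
  induction i with
  | zero =>
    intro hs _
    have : s = 0 := by omega
    subst this; rfl
  | succ m ih =>
    intro hs hrun
    rw [pvABack]
    by_cases hms : s = m + 1
    · subst hms
      rcases hb with h0 | hf
      · omega
      · simp only [Nat.add_sub_cancel] at hf
        unfold pvIsh at hf
        rw [if_pos (Or.inr (by rw [hf]; simp))]
    · have hsm : s ≤ m := by omega
      have hm : pvIsh lines m = true := hrun m hsm (by omega)
      unfold pvIsh at hm
      rw [if_neg]
      · exact ih hsm (fun k hk1 hk2 => hrun k hk1 (by omega))
      · simp only [not_or, not_not]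
        exact ⟨pvStartswith_ne_empty hm, by simpa using hm⟩

-- the two forward scans agree, and A's scan steps once at a `#~` line
theorem pvFwd_eq (lines : List String) (n : Nat) :
    ∀ d e, n - e ≤ d → pvAFwd lines n e = pvBFwd lines n e := by
  intro d
  induction d with
  | zero =>
    intro e h; rw [pvAFwd, pvBFwd]
    split
    · omega
    · rfl
  | succ d ih =>
    intro e h; rw [pvAFwd, pvBFwd]
    split
    · exact ih (e + 1) (by omega)
    · rfl

theorem pvAFwd_step (lines : List String) (n i : Nat) (h1 : i < n)
    (h2 : pvIsht lines i = true) : pvAFwd lines n i = pvAFwd lines n (i + 1) := by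
  rw [pvAFwd]; exact if_pos ⟨h1, h2⟩

-- the forward scan only passes over `#~` lines
theorem pvAFwd_run (lines : List String) (n : Nat) :
    ∀ d e, n - e ≤ d → ∀ k, e ≤ k → k < pvAFwd lines n e → pvIsht lines k = true := by
  intro d
  induction d with
  | zero =>
    intro e h k hk1 hk2
    rw [pvAFwd] at hk2
    split at hk2
    · omega
    · omega
  | succ d ih =>
    intro e h k hk1 hk2
    rw [pvAFwd] at hk2
    split at hk2
    · rename_i hc
      by_cases hek : k = e
      · subst hek; exact hc.2
      · exact ih (e + 1) (by omega) k (by omega) hk2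
    · omega

-- stepping the invariant over one `#` line
theorem pvInv_step (lines : List String) (i : Nat) (cs : Option Nat)
    (hsh : pvIsh lines i = true) (hinv : pvInv lines i cs) :
    pvInv lines (i + 1) (some (cs.getD i)) := by
  cases cs with
  | none =>
    have hinv' : i = 0 ∨ pvIsh lines (i - 1) = false := hinv
    refine ⟨by simp, ?_, by simpa using hinv'⟩
    intro k hk1 hk2
    simp only [Option.getD_none] at hk1
    have : k = i := by omega
    subst this; exact hsh
  | some s =>
    obtain ⟨h1, h2, h3⟩ := hinv
    refine ⟨by simp; omega, ?_, by simpa using h3⟩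
    intro k hk1 hk2
    simp only [Option.getD_some] at hk1
    by_cases hki : k < i
    · exact h2 k hk1 hki
    · have : k = i := by omega
      subst this; exact hsh

-- the invariant survives a jump across a run of `#` lines
theorem pvInv_run (lines : List String) (s j e : Nat) (hinv : pvInv lines j (some s))
    (hje : j ≤ e) (hrun : ∀ k, j ≤ k → k < e → pvIsh lines k = true) :
    pvInv lines e (some s) := by
  obtain ⟨h1, h2, h3⟩ := hinv
  refine ⟨by omega, ?_, h3⟩
  intro k hk1 hk2
  by_cases hkj : k < j
  · exact h2 k hk1 hkj
  · exact hrun k (by omega) hk2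

-- main simulation: under the invariant the two loops agree
theorem pvLoop_eq (lines : List String) (n : Nat) :
    ∀ d i cs acc, n - i ≤ d → pvInv lines i cs →
      pvALoop lines n i acc = pvBLoop lines n i cs acc := by
  intro d
  induction d with
  | zero =>
    intro i cs acc h _
    rw [pvALoop, pvBLoop]
    rw [dif_neg (by omega), dif_neg (by omega)]
  | succ d ih =>
    intro i cs acc h hinv
    rw [pvALoop, pvBLoop]
    by_cases hi : i < n
    · rw [dif_pos hi, dif_pos hi]
      simp only
      by_cases hsh : pvIsh lines i = true
      · rw [if_pos (by exact hsh)]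
        by_cases hsht : pvIsht lines i = true
        · rw [dif_pos (by exact hsht), if_pos (by exact hsht)]
          have hstart : pvABack lines i i = cs.getD i := by
            cases cs with
            | none =>
              have hinv' : i = 0 ∨ pvIsh lines (i - 1) = false := hinv
              exact pvABack_run lines i
                (by rcases hinv' with h0 | hf
                    · subst h0; exact Or.inl rfl
                    · exact Or.inr hf)
                i (Nat.le_refl i) (by intro k hk1 hk2; omega)
            | some s =>
              obtain ⟨hs1, hs2, hs3⟩ := hinv
              exact pvABack_run lines s hs3 i hs1 hs2
          have hend : pvAFwd lines n i = pvBFwd lines n (i + 1) := by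
            rw [pvAFwd_step lines n i hi hsht]
            exact pvFwd_eq lines n (n - (i + 1)) (i + 1) (Nat.le_refl _)
          rw [hstart, hend]
          have hlt : i < pvAFwd lines n i := pvAFwd_lt lines n i hi hsht
          have hrun := pvAFwd_run lines n (n - i) i (Nat.le_refl _)
          apply ih
          · rw [← hend]; omega
          · rw [← hend]
            exact pvInv_run lines (cs.getD i) (i + 1) (pvAFwd lines n i)
              (pvInv_step lines i cs hsh hinv) (by omega)
              (fun k hk1 hk2 => pvIsh_of_isht lines k (hrun k (by omega) hk2))
        · rw [dif_neg (by exact hsht), if_neg (by exact hsht)]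
          apply ih
          · omega
          · exact pvInv_step lines i cs hsh hinv
      · have hsht : ¬ pvIsht lines i = true := fun hc => hsh (pvIsh_of_isht lines i hc)
        rw [dif_neg (by exact hsht), if_neg (by exact hsh)]
        apply ih
        · omega
        · exact Or.inr (by simpa using hsh)
    · rw [dif_neg hi, dif_neg hi]

-- ===== VERDICT (by name: the statement is the Claim_ definition above) =====
theorem obsolete_block_ranges_py_spec : Claim_equal_obsolete_block_ranges_py := by
  intro lines _
  unfold Spec_obsolete_block_ranges_py obsolete_block_ranges_py obsolete_block_ranges_py_alt
  exact pvLoop_eq lines lines.length lines.length 0 none [] (by omega) (Or.inl rfl)
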